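-- pv_equiv track=rewrite | github.com/KazukiNoSuzaku/Leetcode | Python/2178_Maximum_Split_of_Positive_Even_Integers.py | maximumEvenSplit
-- ===== SOURCE A (Python) =====
-- def maximumEvenSplit(finalSum):
--     """
--     :type finalSum: int
--     :rtype: List[int]
--     """
--     if finalSum % 2 != 0:
--         return []
--     result = []
--     curr = 2
--     remaining = finalSum
--     while remaining >= curr:
--         result.append(curr)
--         remaining -= curr
--         curr += 2
--     # Add leftover to the last element to keep it even and distinct
--     if remaining > 0:
--         result[-1] += remaining
--     return result
-- ===== SOURCE B (Python) =====
-- def maximumEvenSplit(finalSum):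
--     # Binary-search the largest m with m*(m+1) <= finalSum
--     # (the maximal number of distinct even parts), then build [2,4,...,2m] and
--     # fold the leftover into the last part.
--     if finalSum % 2 != 0 or finalSum < 2:
--         return []
--     lo, hi = 1, finalSum
--     while hi - lo > 1:
--         mid = (lo + hi) // 2
--         if mid * (mid + 1) <= finalSum:
--             lo = mid
--         else:
--             hi = mid
--     result = [2 * i for i in range(1, lo + 1)]
--     result[-1] += finalSum - lo * (lo + 1)
--     return result
-- ===== Notes on version B (the rewrite author's own statement) =====
-- stated objective: alternative
-- what changed: Replaces A's while-loop that accumulates one even part per iteration with a binary search for the largest part count m with m*(m+1) <= finalSum, building the result list directly from m and folding the leftover into the last part.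
import Mathlib
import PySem

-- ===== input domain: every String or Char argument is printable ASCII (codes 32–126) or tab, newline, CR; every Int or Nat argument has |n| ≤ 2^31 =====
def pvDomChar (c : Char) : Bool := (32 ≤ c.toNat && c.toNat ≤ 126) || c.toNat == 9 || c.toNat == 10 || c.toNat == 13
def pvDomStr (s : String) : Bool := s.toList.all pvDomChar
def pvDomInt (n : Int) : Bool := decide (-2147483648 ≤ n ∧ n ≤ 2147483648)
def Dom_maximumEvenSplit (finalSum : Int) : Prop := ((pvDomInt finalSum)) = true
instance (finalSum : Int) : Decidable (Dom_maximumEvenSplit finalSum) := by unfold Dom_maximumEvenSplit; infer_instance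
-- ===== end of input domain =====

-- B replaces A's one-part-at-a-time while-loop by a binary search for the number of parts
-- (objective: alternative algorithm).

-- ===== PORT A =====
-- A's while-loop; fuel only makes the recursion total (finalSum.toNat steps always suffice:
-- each iteration consumes curr ≥ 2 from remaining and runs only while remaining ≥ curr).
def pvLoopA (fuel : Nat) (acc : List Int) (curr rem : Int) : List Int × Int :=
  match fuel with
  | 0 => (acc, rem)
  | fuel + 1 =>
    if rem ≥ curr then pvLoopA fuel (acc ++ [curr]) (curr + 2) (rem - curr)
    else (acc, rem)

def maximumEvenSplit (finalSum : Int) : List Int :=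
  if PySem.Int.mod finalSum 2 ≠ 0 then []
  else
    let p := pvLoopA finalSum.toNat [] 2 finalSum
    if p.2 > 0 then p.1.dropLast ++ [p.1.getLast! + p.2]   -- result[-1] += remaining
    else p.1

-- ===== PORT B =====
-- binary search for the largest m with m*(m+1) ≤ s, starting from lo=1, hi=s
def pvBSearch (s lo hi : Int) : Int :=
  if h : hi - lo > 1 then
    let mid := PySem.Int.floordiv (lo + hi) 2
    if mid * (mid + 1) ≤ s then pvBSearch s mid hi else pvBSearch s lo mid
  else lo
termination_by (hi - lo).toNat
decreasing_by
  · have h1 : lo + 1 ≤ PySem.Int.floordiv (lo + hi) 2 :=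
      (PySem.Int.le_floordiv_iff_mul_le (by omega)).mpr (by omega)
    simp only [mid] at *; omega
  · have h2 : PySem.Int.floordiv (lo + hi) 2 < hi :=
      (PySem.Int.floordiv_lt_iff_lt_mul (by omega)).mpr (by omega)
    simp only [mid] at *; omega

def maximumEvenSplit_alt (finalSum : Int) : List Int :=
  if PySem.Int.mod finalSum 2 ≠ 0 ∨ finalSum < 2 then []
  else
    let m := pvBSearch finalSum 1 finalSum
    let result := (PySem.List.pyRange 1 (m + 1) 1).map (fun i => 2 * i)
    result.dropLast ++ [result.getLast! + (finalSum - m * (m + 1))]   -- result[-1] += leftover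

-- ===== PRECONDITION & SPEC =====
def Spec_maximumEvenSplit (finalSum : Int) (out : List Int) : Prop := out = maximumEvenSplit_alt finalSum
instance (finalSum : Int) (out : List Int) : Decidable (Spec_maximumEvenSplit finalSum out) := by unfold Spec_maximumEvenSplit; infer_instance

-- ===== CLAIM (what is proved, stated in full; the proofs are below) =====
def Claim_equal_maximumEvenSplit : Prop := ∀ (finalSum : Int), Dom_maximumEvenSplit finalSum → Spec_maximumEvenSplit finalSum (maximumEvenSplit finalSum)

-- ===== LEMMAS AND PROOFS =====

-- binary search returns the largest m with m*(m+1) ≤ s (given a correct bracket)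
theorem pvBSearch_correct (s : Int) : ∀ lo hi : Int, 1 ≤ lo → lo < hi →
    lo * (lo + 1) ≤ s → s < hi * (hi + 1) →
    1 ≤ pvBSearch s lo hi ∧ pvBSearch s lo hi * (pvBSearch s lo hi + 1) ≤ s ∧
      s < (pvBSearch s lo hi + 1) * (pvBSearch s lo hi + 2) := by
  intro lo hi
  induction lo, hi using pvBSearch.induct s with
  | case1 lo hi h mid hle ih =>
    intro h1 hlt hlo hhi
    simp only [mid] at hle ih
    have hm1 : lo + 1 ≤ PySem.Int.floordiv (lo + hi) 2 :=
      (PySem.Int.le_floordiv_iff_mul_le (a := lo + hi) (b := 2) (q := lo + 1) (by omega)).mpr (by omega)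
    have hm2 : PySem.Int.floordiv (lo + hi) 2 < hi :=
      (PySem.Int.floordiv_lt_iff_lt_mul (a := lo + hi) (b := 2) (q := hi) (by omega)).mpr (by omega)
    rw [pvBSearch]; simp only [dif_pos h, if_pos hle]
    exact ih (by omega) (by omega) hle hhi
  | case2 lo hi h mid hgt ih =>
    intro h1 hlt hlo hhi
    simp only [mid] at hgt ih
    have hm1 : lo + 1 ≤ PySem.Int.floordiv (lo + hi) 2 :=
      (PySem.Int.le_floordiv_iff_mul_le (a := lo + hi) (b := 2) (q := lo + 1) (by omega)).mpr (by omega)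
    have hm2 : PySem.Int.floordiv (lo + hi) 2 < hi :=
      (PySem.Int.floordiv_lt_iff_lt_mul (a := lo + hi) (b := 2) (q := hi) (by omega)).mpr (by omega)
    rw [pvBSearch]; simp only [dif_pos h, if_neg hgt]
    exact ih h1 (by omega) hlo (by omega)
  | case3 lo hi h =>
    intro h1 hlt hlo hhi
    rw [pvBSearch]; simp only [dif_neg h]
    have : hi = lo + 1 := by omega
    subst this
    refine ⟨h1, hlo, by nlinarith⟩

-- A's loop, characterised: starting at step k, it appends 2(k+1),…,2m and leaves s - m(m+1)
theorem pvLoopA_spec (s : Int) (m : Nat)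
    (hm1 : (m : Int) * (m + 1) ≤ s) (hm2 : s < ((m : Int) + 1) * (m + 2)) :
    ∀ (d : Nat) (fuel : Nat) (acc : List Int) (k : Nat), m = k + d → d ≤ fuel →
      pvLoopA fuel acc (2 * ((k : Int) + 1)) (s - k * (k + 1)) =
        (acc ++ (List.range' (k + 1) d).map (fun n : Nat => 2 * (n : Int)), s - (m : Int) * (m + 1)) := by
  intro d
  induction d with
  | zero =>
    intro fuel acc k hk _
    have hkm : ((k : Nat) : Int) = (m : Int) := by omega
    rw [hkm]
    have hstop : ¬ (2 * ((m : Int) + 1) ≤ s - (m : Int) * (m + 1)) := by nlinarith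
    cases fuel with
    | zero => simp [pvLoopA]
    | succ f => simp [pvLoopA, hstop]
  | succ d ih =>
    intro fuel acc k hk hfuel
    have hk1 : ((k : Nat) : Int) + 1 ≤ (m : Int) := by omega
    have hgo : 2 * ((k : Int) + 1) ≤ s - (k : Int) * (k + 1) := by nlinarith
    cases fuel with
    | zero => omega
    | succ f =>
      have hcond : (s - (k : Int) * (k + 1)) ≥ 2 * ((k : Int) + 1) := hgo
      simp only [pvLoopA, if_pos hcond]
      have harith : s - (k : Int) * (k + 1) - 2 * ((k : Int) + 1)
          = s - ((k : Int) + 1) * (((k : Int) + 1) + 1) := by ring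
      have hrec := ih f (acc ++ [2 * ((k : Int) + 1)]) (k + 1) (by omega) (by omega)
      push_cast at hrec
      have h2 : 2 * ((k : Int) + 1) + 2 = 2 * ((k : Int) + 1 + 1) := by ring
      rw [harith, h2, hrec]
      simp [List.range'_succ]

-- restoring an unmodified last element
theorem pv_bump_zero (l : List Int) (h : l ≠ []) : l.dropLast ++ [l.getLast! + 0] = l := by
  simp [List.getLast!_eq_getLast?_getD, List.getLast?_eq_some_getLast h, List.dropLast_concat_getLast]

-- B's range list equals A's accumulated list
theorem pv_lists_eq (m : Nat) :
    (PySem.List.pyRange 1 ((m : Int) + 1) 1).map (fun i => 2 * i) =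
      (List.range' 1 m).map (fun n : Nat => 2 * (n : Int)) := by
  rw [PySem.List.pyRange_one, List.range'_eq_map_range]
  rw [show ((m : Int) + 1 - 1).toNat = m by omega, List.map_map, List.map_map]
  exact List.map_congr_left (fun x _ => by simp only [Function.comp_apply]; push_cast; ring)

-- ===== VERDICT (by name: the statement is the Claim_ definition above) =====
theorem maximumEvenSplit_spec : Claim_equal_maximumEvenSplit := by
  intro s _
  unfold Spec_maximumEvenSplit maximumEvenSplit maximumEvenSplit_alt
  by_cases hodd : PySem.Int.mod s 2 ≠ 0
  · rw [if_pos hodd, if_pos (Or.inl hodd)]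
  · push_neg at hodd
    have hev : s % 2 = 0 := by
      rw [← PySem.Int.mod_eq_emod_of_pos (by omega : (0:Int) < 2)]; exact hodd
    rw [if_neg (not_not.mpr hodd)]
    by_cases hsmall : s < 2
    · -- even s < 2 means s ≤ 0: A's loop never runs and remaining = s is not > 0
      rw [if_pos (Or.inr hsmall)]
      have hs0 : s ≤ 0 := by omega
      have hloop : pvLoopA s.toNat [] 2 s = ([], s) := by
        rw [(by omega : s.toNat = 0)]; rfl
      rw [hloop]
      simp [show ¬ s > 0 by omega]
    · -- main case: s even, s ≥ 2
      rw [if_neg (not_or.mpr ⟨not_not.mpr hodd, hsmall⟩)]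
      push_neg at hsmall
      set m := pvBSearch s 1 s with hmdef
      obtain ⟨hm1, hmle, hmlt⟩ :=
        pvBSearch_correct s 1 s (le_refl 1) (by omega) (by omega) (by nlinarith)
      have hms : m ≤ s := by nlinarith
      obtain ⟨mN, hcast⟩ : ∃ n : Nat, (n : Int) = m := ⟨m.toNat, by omega⟩
      have hspec := pvLoopA_spec s mN (by rw [hcast]; exact hmle) (by rw [hcast]; exact hmlt)
        mN s.toNat [] 0 (by omega) (by omega)
      norm_num at hspec
      have hlist : (PySem.List.pyRange 1 (m + 1) 1).map (fun i => 2 * i)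
          = (List.range' 1 mN).map (fun n : Nat => 2 * (n : Int)) := by
        rw [← hcast]; exact pv_lists_eq mN
      have hne : (List.range' 1 mN).map (fun n : Nat => 2 * (n : Int)) ≠ [] := by
        simp [List.range'_eq_nil_iff]; omega
      simp only [hspec, hlist, hcast]
      by_cases hpos : s - m * (m + 1) > 0
      · rw [if_pos hpos]
      · rw [if_neg hpos]
        have hzero : s - m * (m + 1) = 0 := by
          have : m * (m + 1) ≤ s := hmle
          omega
        rw [hzero]
        exact (pv_bump_zero _ hne).symm
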